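-- pv_equiv track=rewrite | github.com/Sideloading-Research/telegram_sideload | utils/answer_modifications.py | remove_internal_dialog
-- ===== SOURCE A (Python) =====
-- def find_internal_dialog_positions(answer):
--     """Find positions of internal dialog tags in the answer."""
--     lower_answer = answer.lower()
--     start_idx = lower_answer.find("<")
--     positions = []
--
--     while start_idx != -1:
--         end_idx = lower_answer.find(">", start_idx)
--         if end_idx != -1 and "internal dialog>" in lower_answer[start_idx:end_idx + 1]:
--             positions.append(start_idx)
--         start_idx = lower_answer.find("<", start_idx + 1)
--
--     return positions
--
-- def remove_internal_dialog_section(answer, start_pos):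
--     """Remove a single internal dialog section starting from the given position."""
--     tag_start = answer.find("<", start_pos)
--     tag_end = answer.find(">", tag_start)
--     if tag_start == -1 or tag_end == -1:
--         return answer
--
--     opening_tag = answer[tag_start:tag_end + 1]
--     if "internal dialog>" not in opening_tag.lower():
--         return answer
--
--     # Extract the name part more reliably
--     name_start = opening_tag.find("<") + 1
--     name_end = opening_tag.lower().find("'s internal dialog>")
--     if name_end == -1:
--         return answer
--
--     name_part = opening_tag[name_start:name_end]
--     closing_tag = f"</{name_part}'s internal dialog>"
--
--     section_end = answer.find(closing_tag, tag_end)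
--     if section_end == -1:
--         return answer
--
--     return (
--         answer[:tag_start].rstrip()
--         + "\n"
--         + answer[section_end + len(closing_tag):].lstrip()
--     )
--
-- def remove_internal_dialog(answer):
--     """Remove the first valid internal dialog section from the answer."""
--     possible_starts = find_internal_dialog_positions(answer)
--
--     for start_pos in possible_starts:
--         try:
--             new_answer = remove_internal_dialog_section(answer, start_pos)
--             if new_answer != answer:
--                 return new_answer
--         except Exception:
--             continue
--     return answer
-- ===== SOURCE B (Python) =====
-- def remove_internal_dialog(answer):
--     """Remove the first valid internal dialog section from the answer.
--
--     Single scan over the '<' positions: at each one, check whether the tag up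
--     to the next '>' ends with "'s internal dialog>", extract the name by index
--     arithmetic, and return as soon as the matching closing tag is found.
--     """
--     SUF = "'s internal dialog>"
--     low = answer.lower()
--     cur = low.find("<")
--     while cur != -1:
--         j = low.find(">", cur)
--         if j != -1 and low[cur:j + 1].endswith(SUF):
--             name = answer[cur + 1:j + 1 - len(SUF)]
--             closing = "</" + name + SUF
--             pos = answer.find(closing, j)
--             if pos != -1:
--                 return (
--                     answer[:cur].rstrip()
--                     + "\n"
--                     + answer[pos + len(closing):].lstrip()
--                 )
--         cur = low.find("<", cur + 1)
--     return answer
-- ===== Notes on version B (the rewrite author's own statement) =====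
-- stated objective: simpler
-- what changed: Replaces A's two-phase design (collect every candidate tag-start position into a list, then per position re-derive the tag, re-check candidacy and extract the name via repeated find calls in a helper) with one direct scan over the tag-start positions that tests each tag with a single endswith check, extracts the name by index arithmetic, and returns at the first tag whose closing tag is found.
import Mathlib
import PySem

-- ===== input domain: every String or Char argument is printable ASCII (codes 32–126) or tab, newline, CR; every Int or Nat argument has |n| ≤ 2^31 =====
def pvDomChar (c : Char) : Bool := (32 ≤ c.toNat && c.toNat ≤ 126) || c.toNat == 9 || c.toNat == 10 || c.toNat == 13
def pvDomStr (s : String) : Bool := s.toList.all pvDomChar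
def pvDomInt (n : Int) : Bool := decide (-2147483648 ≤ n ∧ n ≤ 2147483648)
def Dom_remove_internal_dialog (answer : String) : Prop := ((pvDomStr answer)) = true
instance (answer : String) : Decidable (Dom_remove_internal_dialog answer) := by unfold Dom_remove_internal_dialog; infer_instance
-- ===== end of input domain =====

-- B replaces A's collect-candidates-then-retry design with one scan over '<' positions that
-- returns at the first tag whose closing tag is found (objective: simpler).

-- ===== PORT A =====
-- while start_idx != -1: collect candidate positions (fuel = len+1 makes the while loop total;
-- start strictly increases, so the fuel is never exhausted)
def pvPosLoop (low : List Char) : Nat → Int → List Int → List Int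
  | 0, _, acc => acc
  | fuel + 1, start, acc =>
    if start == -1 then acc
    else
      let e := PySem.Chars.findFrom low ">".toList start
      let acc' :=
        if e != -1 && PySem.Chars.isIn "internal dialog>".toList
            (PySem.Chars.slice low (some start) (some (e + 1))) then
          acc ++ [start]
        else acc
      pvPosLoop low fuel (PySem.Chars.findFrom low "<".toList (start + 1)) acc'

def find_internal_dialog_positions_port (answer : String) : List Int :=
  let low := PySem.Chars.lower answer.toList
  pvPosLoop low (answer.toList.length + 1) (PySem.Chars.find low "<".toList) []

def pvRemoveSection (ansL : List Char) (startPos : Int) : List Char :=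
  let tag_start := PySem.Chars.findFrom ansL "<".toList startPos
  let tag_end := PySem.Chars.findFrom ansL ">".toList tag_start
  if tag_start == -1 || tag_end == -1 then ansL
  else
    let opening := PySem.Chars.slice ansL (some tag_start) (some (tag_end + 1))
    if !PySem.Chars.isIn "internal dialog>".toList (PySem.Chars.lower opening) then ansL
    else
      let name_start := PySem.Chars.find opening "<".toList + 1
      let name_end := PySem.Chars.find (PySem.Chars.lower opening) "'s internal dialog>".toList
      if name_end == -1 then ansL
      else
        let name_part := PySem.Chars.slice opening (some name_start) (some name_end)
        let closing := "</".toList ++ name_part ++ "'s internal dialog>".toList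
        let section_end := PySem.Chars.findFrom ansL closing tag_end
        if section_end == -1 then ansL
        else
          PySem.Chars.rstrip (PySem.Chars.slice ansL none (some tag_start))
            ++ "\n".toList
            ++ PySem.Chars.lstrip (PySem.Chars.slice ansL (some (section_end + (closing.length : Int))) none)

def pvTryLoop (ansL : List Char) : List Int → List Char
  | [] => ansL
  | p :: rest =>
    let newA := pvRemoveSection ansL p
    if newA != ansL then newA else pvTryLoop ansL rest

def remove_internal_dialog (answer : String) : String :=
  String.ofList (pvTryLoop answer.toList (find_internal_dialog_positions_port answer))

-- ===== PORT B =====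
-- single scan: while cur != -1, test the tag at cur and return at the first success
-- (fuel = len+1 makes the while loop total; cur strictly increases)
def pvAltLoop (ansL low : List Char) : Nat → Int → List Char
  | 0, _ => ansL
  | fuel + 1, cur =>
    if cur == -1 then ansL
    else
      let j := PySem.Chars.findFrom low ">".toList cur
      if j != -1 && PySem.Chars.endswith (PySem.Chars.slice low (some cur) (some (j + 1)))
          "'s internal dialog>".toList then
        let name := PySem.Chars.slice ansL (some (cur + 1))
          (some (j + 1 - ("'s internal dialog>".toList.length : Int)))
        let closing := "</".toList ++ name ++ "'s internal dialog>".toList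
        let pos := PySem.Chars.findFrom ansL closing j
        if pos != -1 then
          PySem.Chars.rstrip (PySem.Chars.slice ansL none (some cur))
            ++ "\n".toList
            ++ PySem.Chars.lstrip (PySem.Chars.slice ansL (some (pos + (closing.length : Int))) none)
        else pvAltLoop ansL low fuel (PySem.Chars.findFrom low "<".toList (cur + 1))
      else pvAltLoop ansL low fuel (PySem.Chars.findFrom low "<".toList (cur + 1))

def remove_internal_dialog_alt (answer : String) : String :=
  let ansL := answer.toList
  let low := PySem.Chars.lower ansL
  String.ofList (pvAltLoop ansL low (ansL.length + 1) (PySem.Chars.find low "<".toList))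

-- ===== PRECONDITION & SPEC =====
def Spec_remove_internal_dialog (answer : String) (out : String) : Prop := out = remove_internal_dialog_alt answer
instance (answer : String) (out : String) : Decidable (Spec_remove_internal_dialog answer out) := by unfold Spec_remove_internal_dialog; infer_instance

-- ===== CLAIM (what is proved, stated in full; the proofs are below) =====
def Claim_equal_remove_internal_dialog : Prop := ∀ (answer : String), Dom_remove_internal_dialog answer → Spec_remove_internal_dialog answer (remove_internal_dialog answer)

-- ===== LEMMAS AND PROOFS =====

theorem pv_singPrefix (s : List Char) (i : Nat) (c : Char) : [c] <+: s.drop i ↔ s[i]? = some c := by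
  rw [List.cons_prefix_iff]
  constructor
  · rintro ⟨l', hl, -⟩
    have := List.head?_drop (l := s) (i := i)
    rw [hl] at this; simpa using this.symm
  · intro h
    have := List.head?_drop (l := s) (i := i)
    rw [h] at this
    cases hd : s.drop i with
    | nil => rw [hd] at this; simp at this
    | cons a t => rw [hd] at this; simp at this; exact ⟨t, by rw [← this], List.nil_prefix⟩

theorem pv_startInv (ansL : List Char) (s0 : Int) (k : Nat) (hk : k ≤ ansL.length)
    (h : s0 = PySem.Chars.findFrom (PySem.Chars.lower ansL) "<".toList (k : Int)) :
    s0 = -1 ∨ ∃ p : Nat, s0 = (p : Int) ∧ k ≤ p ∧ p < ansL.length ∧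
      (PySem.Chars.lower ansL)[p]? = some '<' := by
  by_cases h0 : s0 = -1
  · exact Or.inl h0
  · right
    rw [h] at h0
    have hlen : k ≤ (PySem.Chars.lower ansL).length := by
      simpa [PySem.Chars.lower] using hk
    obtain ⟨hge, hpre, -⟩ := PySem.Chars.findFrom_natCast_spec _ _ k hlen h0
    rw [show "<".toList = ['<'] from rfl, pv_singPrefix] at hpre
    have hlt := (List.getElem?_eq_some_iff.mp hpre).1
    refine ⟨(PySem.Chars.findFrom (PySem.Chars.lower ansL) "<".toList (k : Int)).toNat,
      by omega, by omega, ?_, hpre⟩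
    simpa [PySem.Chars.lower] using hlt

theorem pv_lowerChar_fixed (c d : Char) (hd : d.toNat < 65) :
    PySem.Chars.lowerChar c = d ↔ c = d := by
  unfold PySem.Chars.lowerChar PySem.Chars.isupper
  split_ifs with h
  · simp only [Bool.and_eq_true, decide_eq_true_eq, Char.le_def, UInt32.le_iff_toNat_le] at h
    have h65 : 65 ≤ c.toNat ∧ c.toNat ≤ 90 := ⟨h.1, h.2⟩
    constructor
    · intro he
      have hv : (Char.ofNat (c.toNat + 32)).toNat = c.toNat + 32 := by
        rw [Char.toNat_ofNat, if_pos (Or.inl (by omega))]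
      rw [he] at hv
      omega
    · intro he
      subst he
      omega
  · rfl

theorem pv_low_get (ansL : List Char) (i : Nat) (d : Char) (hd : d.toNat < 65) :
    (PySem.Chars.lower ansL)[i]? = some d ↔ ansL[i]? = some d := by
  simp only [PySem.Chars.lower, List.getElem?_map]
  cases h : ansL[i]? with
  | none => simp
  | some a => simp [pv_lowerChar_fixed a d hd]

theorem pv_infix_drop_iff (sub s : List Char) (k : Nat) :
    sub <:+: s.drop k ↔ ∃ i, k ≤ i ∧ sub <+: s.drop i := by
  rw [← PySem.Chars.isIn_iff_infix, ← PySem.Chars.exists_prefix_drop_iff_isIn]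
  constructor
  · rintro ⟨j, hj⟩
    exact ⟨k + j, Nat.le_add_right _ _, by rwa [List.drop_drop] at hj⟩
  · rintro ⟨i, hki, hi⟩
    exact ⟨i - k, by rwa [List.drop_drop, Nat.add_sub_cancel' hki]⟩

theorem pv_findFrom_congr (s s' sub sub' : List Char) (k : Nat)
    (hk : k ≤ s.length) (hk' : k ≤ s'.length)
    (h : ∀ i, k ≤ i → (sub <+: s.drop i ↔ sub' <+: s'.drop i)) :
    PySem.Chars.findFrom s sub (k : Int) = PySem.Chars.findFrom s' sub' (k : Int) := by
  by_cases h1 : PySem.Chars.findFrom s sub (k : Int) = -1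
  · rw [h1]
    rw [PySem.Chars.findFrom_natCast_eq_neg_one_iff s sub k hk, pv_infix_drop_iff] at h1
    rw [eq_comm, PySem.Chars.findFrom_natCast_eq_neg_one_iff s' sub' k hk', pv_infix_drop_iff]
    rintro ⟨i, hki, hi⟩
    exact h1 ⟨i, hki, (h i hki).mpr hi⟩
  · obtain ⟨hge, hpre, hmin⟩ := PySem.Chars.findFrom_natCast_spec s sub k hk h1
    have h2 : PySem.Chars.findFrom s' sub' (k : Int) ≠ -1 := by
      intro hbad
      rw [PySem.Chars.findFrom_natCast_eq_neg_one_iff s' sub' k hk', pv_infix_drop_iff] at hbad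
      apply hbad
      have hkv : k ≤ (PySem.Chars.findFrom s sub (k : Int)).toNat := by omega
      exact ⟨_, hkv, (h _ hkv).mp hpre⟩
    obtain ⟨hge', hpre', hmin'⟩ := PySem.Chars.findFrom_natCast_spec s' sub' k hk' h2
    have hkv : k ≤ (PySem.Chars.findFrom s sub (k : Int)).toNat := by omega
    have hkv' : k ≤ (PySem.Chars.findFrom s' sub' (k : Int)).toNat := by omega
    have e1 : ¬ (PySem.Chars.findFrom s sub (k : Int)).toNat <
        (PySem.Chars.findFrom s' sub' (k : Int)).toNat := by
      intro hlt
      exact hmin' _ hkv hlt ((h _ hkv).mp hpre)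
    have e2 : ¬ (PySem.Chars.findFrom s' sub' (k : Int)).toNat <
        (PySem.Chars.findFrom s sub (k : Int)).toNat := by
      intro hlt
      exact hmin _ hkv' hlt ((h _ hkv').mpr hpre')
    omega

theorem pv_findFrom_at (s : List Char) (c : Char) (p : Nat) (hp : s[p]? = some c) :
    PySem.Chars.findFrom s [c] (p : Int) = (p : Int) := by
  have hlt := (List.getElem?_eq_some_iff.mp hp).1
  have hk : p ≤ s.length := le_of_lt hlt
  have hocc : [c] <+: s.drop p := (pv_singPrefix s p c).mpr hp
  have hne : PySem.Chars.findFrom s [c] (p : Int) ≠ -1 := by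
    rw [ne_eq, PySem.Chars.findFrom_natCast_eq_neg_one_iff s [c] p hk]
    simp only [not_not]
    exact hocc.isInfix
  obtain ⟨hge, hpre, hmin⟩ := PySem.Chars.findFrom_natCast_spec s [c] p hk hne
  by_cases hq : (PySem.Chars.findFrom s [c] (p : Int)).toNat = p
  · omega
  · exact absurd hocc (hmin p le_rfl (by omega))

theorem pv_infix_gt_suffix (ys t : List Char) (hy : '>' ∉ ys) :
    (t ++ ['>']) <:+: (ys ++ ['>']) ↔ (t ++ ['>']) <:+ (ys ++ ['>']) := by
  constructor
  · rintro ⟨u, v, huv⟩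
    rcases List.eq_nil_or_concat v with rfl | ⟨w, z, rfl⟩
    · exact ⟨u, by simpa using huv⟩
    · exfalso
      rw [show u ++ (t ++ ['>']) ++ w.concat z = (u ++ t ++ '>' :: w).concat z by simp,
        show ys ++ ['>'] = ys.concat '>' by simp, List.concat_inj] at huv
      exact hy (huv.1 ▸ (by simp : '>' ∈ u ++ t ++ '>' :: w))
  · exact List.IsSuffix.isInfix

theorem pv_gt_pos (ys : List Char) (hy : '>' ∉ ys) (j : Nat)
    (h : (ys ++ ['>'])[j]? = some '>') : j = ys.length := by
  rcases List.getElem?_eq_some_iff.mp h with ⟨hj, hget⟩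
  simp [List.length_append] at hj
  by_cases hlt : j < ys.length
  · rw [List.getElem_append_left hlt] at hget
    exact absurd (hget ▸ List.getElem_mem hlt) hy
  · omega

theorem pv_prefix_drop_gt (ys t : List Char) (hy : '>' ∉ ys) (i : Nat)
    (h : (t ++ ['>']) <+: (ys ++ ['>']).drop i) : i + t.length = ys.length := by
  have hh := List.prefix_iff_eq_take.mp h
  have h2 : (((ys ++ ['>']).drop i).take (t ++ ['>']).length)[t.length]? = some '>' := by
    rw [← hh]
    simp
  rw [List.getElem?_take, if_pos (by simp)] at h2
  rw [List.getElem?_drop] at h2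
  have := pv_gt_pos ys hy _ h2
  omega

theorem pv_span_decomp (low : List Char) (p q : Nat) (hpq : p ≤ q) (hq : q < low.length)
    (hgt : low[q]? = some '>') (hmin : ∀ i : Nat, p ≤ i → i < q → low[i]? ≠ some '>') :
    PySem.Chars.slice low (some (p : Int)) (some ((q : Int) + 1)) =
      ((low.drop p).take (q - p)) ++ ['>'] ∧ '>' ∉ (low.drop p).take (q - p) := by
  constructor
  · rw [show ((q : Int) + 1) = ((q + 1 : Nat) : Int) by push_cast; ring]
    rw [PySem.Chars.slice_eq_listSlice, PySem.List.slice_natCast]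
    rw [show q + 1 - p = (q - p) + 1 by omega, List.take_add_one, List.getElem?_drop,
      show p + (q - p) = q by omega, hgt]
    rfl
  · intro hmem
    rcases List.mem_iff_getElem?.mp hmem with ⟨i, hi⟩
    rw [List.getElem?_take] at hi
    split at hi
    · rw [List.getElem?_drop] at hi
      exact hmin (p + i) (by omega) (by omega) hi
    · simp at hi

theorem pv_find_span_nosuf (ys : List Char) (hy : '>' ∉ ys)
    (h : ¬ "'s internal dialog>".toList <:+ (ys ++ ['>'])) :
    PySem.Chars.find (ys ++ ['>']) "'s internal dialog>".toList = -1 := by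
  rw [PySem.Chars.find_eq_neg_one_iff]
  rw [show "'s internal dialog>".toList = "'s internal dialog".toList ++ ['>'] from rfl] at h ⊢
  rw [pv_infix_gt_suffix ys _ hy]
  exact h

theorem pv_find_span_suf (ys : List Char) (hy : '>' ∉ ys)
    (h : "'s internal dialog>".toList <:+ (ys ++ ['>'])) :
    PySem.Chars.find (ys ++ ['>']) "'s internal dialog>".toList = ((ys.length - 18 : Nat) : Int)
      ∧ 18 ≤ ys.length := by
  have hnn : 0 ≤ PySem.Chars.find (ys ++ ['>']) "'s internal dialog>".toList := by
    rw [PySem.Chars.find_nonneg_iff]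
    exact h.isInfix
  obtain ⟨hpre, hmin⟩ := PySem.Chars.find_spec hnn
  have hpos := pv_prefix_drop_gt ys "'s internal dialog".toList hy _
    (by rw [show "'s internal dialog".toList ++ ['>'] = "'s internal dialog>".toList from rfl]
        exact hpre)
  simp only [show ("'s internal dialog".toList).length = 18 from rfl] at hpos
  constructor
  · omega
  · omega

theorem pv_rstrip_len (s : List Char) : (PySem.Chars.rstrip s).length ≤ s.length := by
  unfold PySem.Chars.rstrip
  calc ((List.dropWhile PySem.Chars.isspace s.reverse).reverse).length
      = (List.dropWhile PySem.Chars.isspace s.reverse).length := List.length_reverse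
    _ ≤ s.reverse.length := List.length_dropWhile_le _ _
    _ = s.length := List.length_reverse

theorem pv_lstrip_len (s : List Char) : (PySem.Chars.lstrip s).length ≤ s.length := by
  unfold PySem.Chars.lstrip
  exact List.length_dropWhile_le _ _

theorem pv_posLoop_append (low : List Char) :
    ∀ (fuel : Nat) (start : Int) (acc : List Int),
      pvPosLoop low fuel start acc = acc ++ pvPosLoop low fuel start [] := by
  intro fuel
  induction fuel with
  | zero => intro start acc; simp [pvPosLoop]
  | succ fuel IH =>
    intro start acc
    simp only [pvPosLoop]
    by_cases h : (start == -1) = true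
    · simp [h]
    · simp only [Bool.not_eq_true] at h
      simp only [h, Bool.false_eq_true, if_false]
      split
      · rw [IH _ (acc ++ [start]), IH _ ([] ++ [start])]
        simp
      · rw [IH _ acc]



-- Common facts about a candidate position p with first '>' at q.
theorem pv_section_core (ansL : List Char) (p q : Nat)
    (hpn : p < ansL.length) (hqn : q < ansL.length) (hpq : p ≤ q)
    (hansp : ansL[p]? = some '<')
    (h_te : PySem.Chars.findFrom ansL ">".toList (p : Int) = (q : Int))
    (hlowq : (PySem.Chars.lower ansL)[q]? = some '>') :
    PySem.Chars.lower (PySem.Chars.slice ansL (some (p : Int)) (some ((q : Int) + 1))) =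
      ((PySem.Chars.lower ansL).drop p).take (q - p) ++ ['>'] ∧
    (PySem.Chars.slice ansL (some (p : Int)) (some ((q : Int) + 1)))[0]? = some '<' := by
  have hcast : ((q : Int) + 1) = ((q + 1 : Nat) : Int) := by push_cast; ring
  rw [hcast, PySem.Chars.slice_eq_listSlice, PySem.List.slice_natCast]
  constructor
  · show List.map PySem.Chars.lowerChar _ = _
    rw [List.map_take, List.map_drop]
    show ((PySem.Chars.lower ansL).drop p).take (q + 1 - p) = _
    rw [show q + 1 - p = (q - p) + 1 by omega, List.take_add_one, List.getElem?_drop,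
      show p + (q - p) = q by omega, hlowq]
    rfl
  · rw [List.getElem?_take, if_pos (by omega), List.getElem?_drop]
    simpa using hansp


theorem pv_section_nosuf (ansL : List Char) (p q : Nat)
    (hpn : p < ansL.length) (hqn : q < ansL.length) (hpq : p ≤ q)
    (hansp : ansL[p]? = some '<')
    (h_te : PySem.Chars.findFrom ansL ">".toList (p : Int) = (q : Int))
    (hlowq : (PySem.Chars.lower ansL)[q]? = some '>')
    (hygt : '>' ∉ ((PySem.Chars.lower ansL).drop p).take (q - p))
    (hnosuf : ¬ "'s internal dialog>".toList <:+
        (((PySem.Chars.lower ansL).drop p).take (q - p) ++ ['>'])) :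
    pvRemoveSection ansL (p : Int) = ansL := by
  obtain ⟨hlo, _⟩ := pv_section_core ansL p q hpn hqn hpq hansp h_te hlowq
  have h_ts : PySem.Chars.findFrom ansL "<".toList (p : Int) = (p : Int) :=
    pv_findFrom_at ansL '<' p hansp
  simp only [pvRemoveSection, h_ts, h_te, hlo]
  have hne : PySem.Chars.find
      (((PySem.Chars.lower ansL).drop p).take (q - p) ++ ['>'])
      "'s internal dialog>".toList = -1 := pv_find_span_nosuf _ hygt hnosuf
  simp only [hne]
  split
  · rfl
  · split
    · rfl
    · simp


theorem pv_section_suf (ansL : List Char) (p q : Nat)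
    (hpn : p < ansL.length) (hqn : q < ansL.length) (hpq : p ≤ q)
    (hansp : ansL[p]? = some '<')
    (h_te : PySem.Chars.findFrom ansL ">".toList (p : Int) = (q : Int))
    (hlowq : (PySem.Chars.lower ansL)[q]? = some '>')
    (hygt : '>' ∉ ((PySem.Chars.lower ansL).drop p).take (q - p))
    (hsuf : "'s internal dialog>".toList <:+
        (((PySem.Chars.lower ansL).drop p).take (q - p) ++ ['>'])) :
    19 ≤ q - p ∧
    pvRemoveSection ansL (p : Int) =
      (if (PySem.Chars.findFrom ansL
            ("</".toList ++ (ansL.drop (p + 1)).take (q - p - 19) ++ "'s internal dialog>".toList)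
            (q : Int) == -1) = true then ansL
       else
         PySem.Chars.rstrip (PySem.Chars.slice ansL none (some (p : Int)))
           ++ "\n".toList
           ++ PySem.Chars.lstrip (PySem.Chars.slice ansL
             (some (PySem.Chars.findFrom ansL
                ("</".toList ++ (ansL.drop (p + 1)).take (q - p - 19) ++ "'s internal dialog>".toList)
                (q : Int) +
               (("</".toList ++ (ansL.drop (p + 1)).take (q - p - 19) ++ "'s internal dialog>".toList).length : Int)))
             none)) := by
  obtain ⟨hlo, hop0⟩ := pv_section_core ansL p q hpn hqn hpq hansp h_te hlowq
  have h_ts : PySem.Chars.findFrom ansL "<".toList (p : Int) = (p : Int) :=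
    pv_findFrom_at ansL '<' p hansp
  have hlowlen : (PySem.Chars.lower ansL).length = ansL.length := by
    simp [PySem.Chars.lower]
  have hyslen : (((PySem.Chars.lower ansL).drop p).take (q - p)).length = q - p := by
    rw [List.length_take, List.length_drop]
    omega
  obtain ⟨hfind0, h18'⟩ := pv_find_span_suf _ hygt hsuf
  rw [hyslen] at hfind0
  have h18 : 18 ≤ q - p := by omega
  have hlowp : (PySem.Chars.lower ansL)[p]? = some '<' :=
    (pv_low_get ansL p '<' (by decide)).mpr hansp
  have h19 : 19 ≤ q - p := by
    by_contra h'
    have heq18 : q - p = 18 := by omega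
    have hspan_eq : ((PySem.Chars.lower ansL).drop p).take (q - p) ++ ['>'] =
        "'s internal dialog>".toList := by
      refine (List.IsSuffix.eq_of_length hsuf ?_).symm
      rw [show ("'s internal dialog>".toList).length = 19 from rfl, List.length_append, hyslen]
      simp [heq18]
    have h0 : (((PySem.Chars.lower ansL).drop p).take (q - p) ++ ['>'])[0]? = some '<' := by
      rw [List.getElem?_append_left (by omega : 0 < (((PySem.Chars.lower ansL).drop p).take (q - p)).length)]
      rw [List.getElem?_take, if_pos (by omega), List.getElem?_drop]
      simpa using hlowp
    rw [hspan_eq] at h0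
    simp at h0
  refine ⟨h19, ?_⟩
  have hcast : ((q : Int) + 1) = ((q + 1 : Nat) : Int) := by push_cast; ring
  have hopen : PySem.Chars.slice ansL (some (p : Int)) (some ((q : Int) + 1)) =
      (ansL.drop p).take (q + 1 - p) := by
    rw [hcast, PySem.Chars.slice_eq_listSlice, PySem.List.slice_natCast]
  have hf0 : PySem.Chars.find (PySem.Chars.slice ansL (some (p : Int)) (some ((q : Int) + 1)))
      "<".toList = 0 := by
    have h := pv_findFrom_at _ '<' 0 hop0
    rw [Nat.cast_zero, PySem.Chars.findFrom_zero] at h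
    exact h
  have hin : PySem.Chars.isIn "internal dialog>".toList
      (((PySem.Chars.lower ansL).drop p).take (q - p) ++ ['>']) = true := by
    rw [PySem.Chars.isIn_iff_infix]
    exact (List.IsSuffix.trans (by decide) hsuf).isInfix
  have hc1 : (((p : Int)) == -1) = false := by simp
  have hc2 : (((q : Int)) == -1) = false := by simp
  have hc3 : ((((q - p - 18 : Nat) : Int)) == -1) = false := by simp
  have hnameeq : PySem.Chars.slice (PySem.Chars.slice ansL (some (p : Int)) (some ((q : Int) + 1)))
      (some (0 + 1)) (some ((q - p - 18 : Nat) : Int)) = (ansL.drop (p + 1)).take (q - p - 19) := by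
    rw [hopen, show ((0 : Int) + 1) = (1 : Int) by ring]
    rw [PySem.Chars.slice_eq_listSlice, PySem.List.slice_toNat _ (by norm_num) (by positivity)]
    simp only [Int.toNat_natCast, Int.toNat_one]
    rw [List.drop_take, List.drop_drop, List.take_take]
    congr 1
    omega
  simp only [pvRemoveSection, h_ts, h_te, hlo, hfind0, hf0, hin, hc1, hc2, hc3, hnameeq]
  simp only [Bool.or_false, Bool.not_true, Bool.false_eq_true, if_false, Bool.or_self,
    Bool.not_false, if_true]

theorem pv_main (ansL : List Char) : ∀ (fuel : Nat) (start : Int),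
    (start = -1 ∨ ∃ p : Nat, start = (p : Int) ∧ p < ansL.length ∧
      (PySem.Chars.lower ansL)[p]? = some '<') →
    (∀ p : Nat, start = (p : Int) → ansL.length - p < fuel) →
    pvTryLoop ansL (pvPosLoop (PySem.Chars.lower ansL) fuel start []) =
      pvAltLoop ansL (PySem.Chars.lower ansL) fuel start := by
  intro fuel
  induction fuel with
  | zero =>
    intro start hinv hfuel
    simp [pvPosLoop, pvAltLoop, pvTryLoop]
  | succ fuel IH =>
    intro start hinv hfuel
    rcases hinv with rfl | ⟨p, rfl, hplt, hpc⟩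
    · simp [pvPosLoop, pvAltLoop, pvTryLoop]
    · have hlowlen : (PySem.Chars.lower ansL).length = ansL.length := by
        simp [PySem.Chars.lower]
      have hcastp1 : ((p : Int) + 1) = ((p + 1 : Nat) : Int) := by push_cast; ring
      have hnext0 := pv_startInv ansL
        (PySem.Chars.findFrom (PySem.Chars.lower ansL) "<".toList ((p : Int) + 1)) (p + 1)
        (by omega) (by rw [hcastp1])
      have hnextinv : PySem.Chars.findFrom (PySem.Chars.lower ansL) "<".toList ((p : Int) + 1) = -1 ∨
          ∃ r : Nat, PySem.Chars.findFrom (PySem.Chars.lower ansL) "<".toList ((p : Int) + 1) = (r : Int) ∧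
            r < ansL.length ∧ (PySem.Chars.lower ansL)[r]? = some '<' := by
        rcases hnext0 with h | ⟨r, h1, h2, h3, h4⟩
        · exact Or.inl h
        · exact Or.inr ⟨r, h1, h3, h4⟩
      have hnextfuel : ∀ r : Nat,
          PySem.Chars.findFrom (PySem.Chars.lower ansL) "<".toList ((p : Int) + 1) = (r : Int) →
          ansL.length - r < fuel := by
        intro r hr
        have hf := hfuel p rfl
        rcases hnext0 with h | ⟨r2, h1, h2, h3, h4⟩
        · rw [h] at hr; omega
        · rw [h1] at hr
          have hrr : r2 = r := by exact_mod_cast hr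
          omega
      have IH' := IH _ hnextinv hnextfuel
      have hc1 : (((p : Int)) == -1) = false := by simp
      by_cases hgt : PySem.Chars.findFrom (PySem.Chars.lower ansL) ">".toList ((p : Int)) = -1
      · simp only [pvPosLoop, pvAltLoop, hc1, Bool.false_eq_true, if_false, hgt]
        simp only [show ((-1 : Int) != -1) = false from rfl, Bool.false_and, Bool.false_eq_true,
          if_false]
        exact IH'
      · have hplen' : p ≤ (PySem.Chars.lower ansL).length := by omega
        obtain ⟨hge, hpre, hmin⟩ :=
          PySem.Chars.findFrom_natCast_spec _ ">".toList p hplen' hgt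
        obtain ⟨q, hqe⟩ : ∃ q : Nat,
            PySem.Chars.findFrom (PySem.Chars.lower ansL) ">".toList ((p : Int)) = (q : Int) := by
          refine ⟨(PySem.Chars.findFrom (PySem.Chars.lower ansL) ">".toList ((p : Int))).toNat, ?_⟩
          omega
        rw [hqe] at hge hpre hmin
        simp only [Int.toNat_natCast] at hpre hmin
        have hpq : p ≤ q := by exact_mod_cast hge
        have hlowq : (PySem.Chars.lower ansL)[q]? = some '>' := (pv_singPrefix _ q '>').mp hpre
        have hqlt : q < ansL.length := by
          have := (List.getElem?_eq_some_iff.mp hlowq).1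
          omega
        have hminq : ∀ i : Nat, p ≤ i → i < q → (PySem.Chars.lower ansL)[i]? ≠ some '>' := by
          intro i h1 h2 hbad
          exact hmin i h1 h2 ((pv_singPrefix _ i '>').mpr hbad)
        have hansp : ansL[p]? = some '<' := (pv_low_get ansL p '<' (by decide)).mp hpc
        have h_te : PySem.Chars.findFrom ansL ">".toList ((p : Int)) = (q : Int) := by
          rw [← hqe]
          exact pv_findFrom_congr ansL (PySem.Chars.lower ansL) ">".toList ">".toList p
            (by omega) (by omega)
            (fun i hi => by
              rw [show ">".toList = ['>'] from rfl, pv_singPrefix, pv_singPrefix,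
                pv_low_get ansL i '>' (by decide)])
        obtain ⟨hspan, hygt⟩ := pv_span_decomp (PySem.Chars.lower ansL) p q hpq (by omega)
          hlowq hminq
        have hq1 : (((q : Int)) != -1) = true := by simp
        simp only [pvPosLoop, pvAltLoop, hc1, Bool.false_eq_true, if_false, hqe, hspan, hq1,
          Bool.true_and]
        by_cases hsuf : "'s internal dialog>".toList <:+
            (((PySem.Chars.lower ansL).drop p).take (q - p) ++ ['>'])
        · have hends : PySem.Chars.endswith
              (((PySem.Chars.lower ansL).drop p).take (q - p) ++ ['>'])
              "'s internal dialog>".toList = true :=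
            (PySem.Chars.endswith_iff _ _).mpr hsuf
          have hin : PySem.Chars.isIn "internal dialog>".toList
              (((PySem.Chars.lower ansL).drop p).take (q - p) ++ ['>']) = true := by
            rw [PySem.Chars.isIn_iff_infix]
            exact (List.IsSuffix.trans (by decide) hsuf).isInfix
          simp only [hends, hin, if_true]
          rw [pv_posLoop_append (PySem.Chars.lower ansL) fuel _ ([] ++ [(p : Int)]), List.nil_append]
          obtain ⟨h19, hsec⟩ := pv_section_suf ansL p q hplt hqlt hpq hansp h_te hlowq hygt hsuf
          have hname : PySem.Chars.slice ansL (some ((p : Int) + 1))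
              (some ((q : Int) + 1 - ("'s internal dialog>".toList.length : Int))) =
              (ansL.drop (p + 1)).take (q - p - 19) := by
            rw [show (("'s internal dialog>".toList.length : Int)) = 19 from rfl]
            rw [show ((p : Int) + 1) = ((p + 1 : Nat) : Int) by omega,
              show ((q : Int) + 1 - 19) = ((q - 18 : Nat) : Int) by omega]
            rw [PySem.Chars.slice_eq_listSlice, PySem.List.slice_natCast]
            congr 1
            omega
          simp only [List.singleton_append, pvTryLoop, hsec, hname]
          by_cases hpos : PySem.Chars.findFrom ansL
              ("</".toList ++ (ansL.drop (p + 1)).take (q - p - 19) ++ "'s internal dialog>".toList) ((q : Int)) = -1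
          · simp only [hpos, BEq.rfl, if_true, bne_self_eq_false, Bool.false_eq_true,
              if_false]
            exact IH'
          · have hposb : ((PySem.Chars.findFrom ansL
                ("</".toList ++ (ansL.drop (p + 1)).take (q - p - 19) ++ "'s internal dialog>".toList) ((q : Int))) == -1) = false := beq_eq_false_iff_ne.mpr hpos
            have hposbne : ((PySem.Chars.findFrom ansL
                ("</".toList ++ (ansL.drop (p + 1)).take (q - p - 19) ++ "'s internal dialog>".toList) ((q : Int))) != -1) = true := bne_iff_ne.mpr hpos
            obtain ⟨qq, hqq⟩ : ∃ qq : Nat, PySem.Chars.findFrom ansL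
                ("</".toList ++ (ansL.drop (p + 1)).take (q - p - 19) ++ "'s internal dialog>".toList) ((q : Int)) = (qq : Int) := by
              obtain ⟨hge2, -, -⟩ := PySem.Chars.findFrom_natCast_spec ansL
                ("</".toList ++ (ansL.drop (p + 1)).take (q - p - 19) ++ "'s internal dialog>".toList) q (by omega) hpos
              refine ⟨(PySem.Chars.findFrom ansL
                ("</".toList ++ (ansL.drop (p + 1)).take (q - p - 19) ++ "'s internal dialog>".toList) ((q : Int))).toNat, ?_⟩
              omega
            have hqq2 : q ≤ qq := by
              obtain ⟨hge2, -, -⟩ := PySem.Chars.findFrom_natCast_spec ansL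
                ("</".toList ++ (ansL.drop (p + 1)).take (q - p - 19) ++ "'s internal dialog>".toList) q (by omega) hpos
              rw [hqq] at hge2
              exact_mod_cast hge2
            have hclen : (("</".toList ++ (ansL.drop (p + 1)).take (q - p - 19) ++ "'s internal dialog>".toList)).length = q - p + 2 := by
              simp only [List.length_append, List.length_take, List.length_drop]
              rw [show ("</".toList).length = 2 from rfl,
                show ("'s internal dialog>".toList).length = 19 from rfl]
              omega
            have hsl1 : PySem.Chars.slice ansL none (some ((p : Int))) = List.take p ansL := by
              rw [PySem.Chars.slice_eq_listSlice, PySem.List.slice_to _ (by positivity)]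
              simp
            have hsl2 : PySem.Chars.slice ansL
                (some ((qq : Int) + ((q - p + 2 : Nat) : Int))) none =
                List.drop (qq + (q - p + 2)) ansL := by
              rw [PySem.Chars.slice_eq_listSlice,
                show ((qq : Int) + ((q - p + 2 : Nat) : Int)) = ((qq + (q - p + 2) : Nat) : Int) by
                  omega,
                PySem.List.slice_from _ (by positivity)]
              simp
              omega
            have hRlen : (PySem.Chars.rstrip (PySem.Chars.slice ansL none (some ((p : Int)))) ++
                "\n".toList ++ PySem.Chars.lstrip (PySem.Chars.slice ansL
                  (some ((qq : Int) + ((q - p + 2 : Nat) : Int))) none)).length <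
                ansL.length := by
              rw [hsl1, hsl2]
              have h1 : (PySem.Chars.rstrip (List.take p ansL)).length ≤ p :=
                le_trans (pv_rstrip_len _) (by rw [List.length_take]; omega)
              have h2 : (PySem.Chars.lstrip (List.drop (qq + (q - p + 2)) ansL)).length ≤
                  ansL.length - (qq + (q - p + 2)) :=
                le_trans (pv_lstrip_len _) (by rw [List.length_drop])
              simp only [List.length_append]
              rw [show ("\n".toList).length = 1 from rfl]
              omega
            have hRne : ((PySem.Chars.rstrip (PySem.Chars.slice ansL none (some ((p : Int)))) ++
                "\n".toList ++ PySem.Chars.lstrip (PySem.Chars.slice ansL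
                  (some (PySem.Chars.findFrom ansL
                    ("</".toList ++ (ansL.drop (p + 1)).take (q - p - 19) ++ "'s internal dialog>".toList) ((q : Int)) +
                    ((("</".toList ++ (ansL.drop (p + 1)).take (q - p - 19) ++ "'s internal dialog>".toList)).length : Int))) none)) != ansL) = true := by
              rw [bne_iff_ne]
              intro hbad
              rw [hqq, hclen] at hbad
              rw [hbad] at hRlen
              omega
            simp only [hposb, Bool.false_eq_true, if_false, hposbne, if_true, hRne]
        · have hends : PySem.Chars.endswith
              (((PySem.Chars.lower ansL).drop p).take (q - p) ++ ['>'])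
              "'s internal dialog>".toList = false := by
            rw [Bool.eq_false_iff, ne_eq, PySem.Chars.endswith_iff]
            exact hsuf
          simp only [hends, Bool.and_false, Bool.false_eq_true, if_false]
          by_cases htag : PySem.Chars.isIn "internal dialog>".toList
              (((PySem.Chars.lower ansL).drop p).take (q - p) ++ ['>']) = true
          · simp only [htag, if_true]
            rw [pv_posLoop_append (PySem.Chars.lower ansL) fuel _ ([] ++ [(p : Int)]), List.nil_append]
            simp only [List.singleton_append, pvTryLoop]
            rw [pv_section_nosuf ansL p q hplt hqlt hpq hansp h_te hlowq hygt hsuf]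
            simp only [bne_self_eq_false, Bool.false_eq_true, if_false]
            exact IH'
          · simp only [Bool.not_eq_true] at htag
            simp only [htag, Bool.false_eq_true, if_false]
            exact IH'

-- ===== VERDICT (by name: the statement is the Claim_ definition above) =====
theorem remove_internal_dialog_spec : Claim_equal_remove_internal_dialog := by
  intro answer _hdom
  unfold Spec_remove_internal_dialog remove_internal_dialog remove_internal_dialog_alt
    find_internal_dialog_positions_port
  congr 1
  apply pv_main
  · have h := pv_startInv answer.toList
      (PySem.Chars.find (PySem.Chars.lower answer.toList) "<".toList) 0 (by omega)
      (by rw [Nat.cast_zero, PySem.Chars.findFrom_zero])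
    rcases h with h | ⟨p, h1, _, h3, h4⟩
    · exact Or.inl h
    · exact Or.inr ⟨p, h1, h3, h4⟩
  · intro p _
    omega
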